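-- pv_equiv track=rewrite | github.com/sg41/tinkoff | tests.py | stupid
-- ===== SOURCE A (Python) =====
-- def stupid(d):
--     d_str = str(d)
--     if len(d_str) == 1:
--         return True
--     for c in d_str:
--         if d_str.count(c) == len(d_str):
--             return True
--
--     return False
-- ===== SOURCE B (Python) =====
-- def stupid(d):
--     return len(set(str(d))) == 1
-- ===== Notes on version B (the rewrite author's own statement) =====
-- stated objective: idiomatic
-- what changed: Replaced the single-digit guard plus per-character repeated .count scan with one pass that collects the distinct characters of str(d) and checks there is exactly one.
import Mathlib
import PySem

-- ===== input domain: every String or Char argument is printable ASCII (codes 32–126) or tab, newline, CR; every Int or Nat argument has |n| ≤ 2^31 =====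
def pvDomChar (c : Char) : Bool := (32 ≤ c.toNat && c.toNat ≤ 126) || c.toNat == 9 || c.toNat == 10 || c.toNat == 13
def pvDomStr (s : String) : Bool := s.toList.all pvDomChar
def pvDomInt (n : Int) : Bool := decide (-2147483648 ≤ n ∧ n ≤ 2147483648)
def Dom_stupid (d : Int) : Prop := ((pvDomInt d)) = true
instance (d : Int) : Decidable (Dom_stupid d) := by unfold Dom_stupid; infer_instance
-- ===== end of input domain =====

-- B replaces A's single-digit guard plus per-character repeated .count scan with one
-- pass collecting the distinct characters of str(d); objective: idiomatic.

-- ===== PORT A =====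
-- d_str.count(c) counts a 1-character needle, which is exactly the character count of the list.
def stupid (d : Int) : Bool :=
  let dStr := (PySem.Int.toStr d).toList
  if dStr.length = 1 then true
  else dStr.any (fun c => dStr.count c == dStr.length)

-- ===== PORT B =====
def stupid_alt (d : Int) : Bool :=
  PySem.Set.len (PySem.Set.ofList (PySem.Int.toStr d).toList) == 1

-- ===== PRECONDITION & SPEC =====
def Spec_stupid (d : Int) (out : Bool) : Prop := out = stupid_alt d
instance (d : Int) (out : Bool) : Decidable (Spec_stupid d out) := by unfold Spec_stupid; infer_instance

-- ===== CLAIM (what is proved, stated in full; the proofs are below) =====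
def Claim_equal_stupid : Prop := ∀ (d : Int), Dom_stupid d → Spec_stupid d (stupid d)

-- ===== LEMMAS AND PROOFS =====

-- str(d) is never empty for an int.
theorem toChars_ne_nil (d : Int) : (PySem.Int.toStr d).toList ≠ [] := by
  rw [PySem.Int.toList_toStr]
  unfold PySem.Int.toChars
  split
  · simp
  · have h : 0 < (Nat.toDigits 10 d.toNat).length := Nat.length_toDigits_pos
    intro hnil
    rw [hnil] at h
    simp at h

-- The distinct-character set has exactly one element iff all characters are equal.
theorem setLen_one_iff (cs : List Char) (hne : cs ≠ []) :
    (PySem.Set.ofList cs).length = 1 ↔ ∀ x ∈ cs, ∀ y ∈ cs, x = y := by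
  rw [← PySem.List.dedup_eq_ofList]
  constructor
  · intro h x hx y hy
    obtain ⟨c, hc⟩ := List.length_eq_one_iff.mp h
    have hx' := (PySem.List.mem_dedup cs x).mpr hx
    have hy' := (PySem.List.mem_dedup cs y).mpr hy
    rw [hc] at hx' hy'
    simp only [List.mem_singleton] at hx' hy'
    rw [hx', hy']
  · intro h
    obtain ⟨a, t, rfl⟩ := List.exists_cons_of_ne_nil hne
    have ha : a ∈ PySem.List.dedup (a :: t) :=
      (PySem.List.mem_dedup _ _).mpr (List.mem_cons_self)
    have hall : ∀ x ∈ PySem.List.dedup (a :: t), x = a := by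
      intro x hx
      exact h x ((PySem.List.mem_dedup _ _).mp hx) a (List.mem_cons_self)
    have hnd := PySem.List.nodup_dedup (a :: t)
    rcases hd : PySem.List.dedup (a :: t) with _ | ⟨b, u⟩
    · rw [hd] at ha; simp at ha
    · rw [hd] at hall hnd
      rcases u with _ | ⟨e, v⟩
      · rfl
      · exfalso
        have hb : b = a := hall b (by simp)
        have he : e = a := hall e (by simp)
        simp [hb, he] at hnd

theorem main_eq (cs : List Char) (hne : cs ≠ []) :
    (if cs.length = 1 then true
     else cs.any (fun c => cs.count c == cs.length)) =
    ((PySem.Set.len (PySem.Set.ofList cs) : Int) == 1) := by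
  have hlen : PySem.Set.len (PySem.Set.ofList cs) = ((PySem.Set.ofList cs).length : Int) := rfl
  by_cases hall : ∀ x ∈ cs, ∀ y ∈ cs, x = y
  · have hset := (setLen_one_iff cs hne).mpr hall
    rw [hlen]
    have hr : ((((PySem.Set.ofList cs).length : Int)) == 1) = true := by
      simp [hset]
    rw [hr]
    split
    · rfl
    · obtain ⟨a, t, rfl⟩ := List.exists_cons_of_ne_nil hne
      rw [List.any_eq_true]
      refine ⟨a, List.mem_cons_self, ?_⟩
      simp only [beq_iff_eq]
      exact List.count_eq_length.mpr (fun b hb => (hall b hb a List.mem_cons_self).symm)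
  · have hset : (PySem.Set.ofList cs).length ≠ 1 :=
      fun h => hall ((setLen_one_iff cs hne).mp h)
    rw [hlen]
    have hr : ((((PySem.Set.ofList cs).length : Int)) == 1) = false := by
      simp; omega
    rw [hr]
    rw [not_forall] at hall
    push Not at hall
    obtain ⟨x, hx, y, hy, hxy⟩ := hall
    have hlen2 : cs.length ≠ 1 := by
      intro h
      obtain ⟨c, hc⟩ := List.length_eq_one_iff.mp h
      rw [hc] at hx hy
      simp at hx hy
      exact hxy (hx.trans hy.symm)
    rw [if_neg hlen2]
    rw [List.any_eq_false]
    intro c hc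
    simp only [beq_iff_eq]
    intro hcount
    have := List.count_eq_length.mp hcount
    exact hxy ((this x hx).symm.trans (this y hy))

-- ===== VERDICT (by name: the statement is the Claim_ definition above) =====
theorem stupid_spec : Claim_equal_stupid := by
  intro d _
  unfold Spec_stupid stupid stupid_alt
  exact main_eq _ (toChars_ne_nil d)
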